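-- pv_equiv track=rewrite | github.com/vmorris/advent-of-code-2016 | 04/sum_sector_id.py | flip_freq
-- ===== SOURCE A (Python) =====
-- def flip_freq(letter_freq):
--   ''' takes a dictionary where key=letter and value=count and flips
--       it to return a dictionary where key=count and
--       value=sorted_string_of_letters '''
--   count_freq = {}
--   for k,v in letter_freq.items():
--     if v not in count_freq.keys():
--       count_freq[v] = k
--     else:
--       count_freq[v] = "".join([count_freq[v], k])
--   for k,v in count_freq.items():
--     count_freq[k] = "".join(sorted(v))
--   return count_freq
-- ===== SOURCE B (Python) =====
-- def flip_freq(letter_freq):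
--     ''' takes a dictionary where key=letter and value=count and flips
--         it to return a dictionary where key=count and
--         value=sorted_string_of_letters '''
--     out = dict.fromkeys(letter_freq.values(), "")
--     for v, c in sorted((v, c) for k, v in letter_freq.items() for c in k):
--         out[v] += c
--     return out
-- ===== Notes on version B (the rewrite author's own statement) =====
-- stated objective: alternative
-- what changed: Replaces A's incremental grouping dict (membership-checked string accumulation) plus a second in-place per-entry re-sorting loop with one composite-key sort of all (count, letter) pairs consumed in a single accumulation pass, so each group is emitted already letter-sorted.
import Mathlib
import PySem

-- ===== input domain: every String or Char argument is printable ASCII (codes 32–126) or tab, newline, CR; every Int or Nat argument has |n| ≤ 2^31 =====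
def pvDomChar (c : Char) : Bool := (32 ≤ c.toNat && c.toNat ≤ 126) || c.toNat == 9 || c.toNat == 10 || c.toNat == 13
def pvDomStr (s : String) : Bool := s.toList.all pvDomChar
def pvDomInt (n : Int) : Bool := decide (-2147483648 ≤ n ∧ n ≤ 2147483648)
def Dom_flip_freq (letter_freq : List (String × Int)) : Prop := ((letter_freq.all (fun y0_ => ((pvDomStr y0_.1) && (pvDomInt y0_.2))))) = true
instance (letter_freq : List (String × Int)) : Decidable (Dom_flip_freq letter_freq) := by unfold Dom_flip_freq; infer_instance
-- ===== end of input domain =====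

-- B replaces A's incremental grouping dict plus second in-place re-sorting loop by one
-- composite-key sort of (count, letter) pairs consumed in a single accumulation pass
-- (objective: alternative; each group comes out letter-sorted without per-group sorting).

-- ===== PORT A =====
-- first loop: for k,v in letter_freq.items():
--   if v not in count_freq.keys(): count_freq[v] = k
--   else: count_freq[v] = "".join([count_freq[v], k])
def flip_freq_loop1 (letter_freq : List (String × Int)) : PySem.Dict Int String :=
  letter_freq.foldl
    (fun d kv =>
      if d.contains kv.2 = false then d.insert kv.2 kv.1
      else d.insert kv.2 (PySem.Str.join "" [d.getD kv.2 "", kv.1]))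
    PySem.Dict.empty

def flip_freq (letter_freq : List (String × Int)) : List (Int × String) :=
  let count_freq := flip_freq_loop1 letter_freq
  -- second loop: for k,v in count_freq.items(): count_freq[k] = "".join(sorted(v))
  -- (it only overwrites values at existing keys, so folding over the initial items view is exact;
  --  "".join over the sorted 1-character strings is String.ofList of the sorted char list)
  (count_freq.items.foldl
    (fun d kv => d.insert kv.1 (String.ofList (PySem.List.sorted kv.2.toList (fun c => c) false)))
    count_freq).items

-- ===== PORT B =====
def flip_freq_alt (letter_freq : List (String × Int)) : List (Int × String) :=
  -- out = dict.fromkeys(letter_freq.values(), "")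
  let out0 : PySem.Dict Int String :=
    (letter_freq.map Prod.snd).foldl (fun d v => d.insert v "") PySem.Dict.empty
  -- sorted((v, c) for k, v in letter_freq.items() for c in k): a Python tuple (int, 1-char str)
  -- sorts lexicographically, on the second component by code point — exactly (Int × Char) under
  -- sorted2 with keys fst, snd
  let pairs := PySem.List.sorted2
    (letter_freq.flatMap (fun kv => kv.1.toList.map (fun c => (kv.2, c))))
    Prod.fst Prod.snd false
  -- for v, c in pairs: out[v] += c   (v is always a key of out, so the default is never used)
  (pairs.foldl (fun d p => d.modify p.1 "" (fun s => s ++ String.singleton p.2)) out0).items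

-- ===== PRECONDITION & SPEC =====
def Spec_flip_freq (letter_freq : List (String × Int)) (out : List (Int × String)) : Prop := out = flip_freq_alt letter_freq
instance (letter_freq : List (String × Int)) (out : List (Int × String)) : Decidable (Spec_flip_freq letter_freq out) := by unfold Spec_flip_freq; infer_instance

-- ===== CLAIM (what is proved, stated in full; the proofs are below) =====
def Claim_equal_flip_freq : Prop := ∀ (letter_freq : List (String × Int)), Dom_flip_freq letter_freq → Spec_flip_freq letter_freq (flip_freq letter_freq)

-- ===== LEMMAS AND PROOFS =====

-- the letters filed under count v, as one char list in scan order
def pvChars (l : List (String × Int)) (v : Int) : List Char :=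
  ((l.filter (fun p => p.2 == v)).map Prod.fst).flatMap String.toList

-- the unsorted (count, letter) pair list B sorts
def pvPairs (l : List (String × Int)) : List (Int × Char) :=
  l.flatMap (fun kv => kv.1.toList.map (fun c => (kv.2, c)))

lemma join_pair_toList (a b : String) :
    (PySem.Str.join "" [a, b]).toList = a.toList ++ b.toList := by
  simp [PySem.Str.join, PySem.Chars.join_cons_cons, PySem.Chars.join_singleton]

-- the string accumulated by A's first loop at key v
lemma getD_loop1_aux (l : List (String × Int)) (d : PySem.Dict Int String) (v : Int) :
    ((l.foldl
      (fun d kv =>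
        if d.contains kv.2 = false then d.insert kv.2 kv.1
        else d.insert kv.2 (PySem.Str.join "" [d.getD kv.2 "", kv.1])) d).getD v "").toList
    = (d.getD v "").toList ++ pvChars l v := by
  induction l generalizing d with
  | nil => simp [pvChars]
  | cons h t ih =>
    simp only [List.foldl_cons]
    by_cases hc : d.contains h.2 = false
    · rw [if_pos hc, ih]
      by_cases he : v = h.2
      · subst he
        rw [PySem.Dict.getD_insert_self, PySem.Dict.getD_of_not_contains _ _ hc]
        simp [pvChars]
      · rw [PySem.Dict.getD_insert_of_ne _ _ _ (by exact he)]
        have : (h.2 == v) = false := by simp; omega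
        simp [pvChars, this]
    · rw [if_neg hc, ih]
      by_cases he : v = h.2
      · subst he
        rw [PySem.Dict.getD_insert_self, join_pair_toList]
        simp [pvChars]
      · rw [PySem.Dict.getD_insert_of_ne _ _ _ (by exact he)]
        have : (h.2 == v) = false := by simp; omega
        simp [pvChars, this]

lemma getD_loop1 (lf : List (String × Int)) (v : Int) :
    ((flip_freq_loop1 lf).getD v "").toList = pvChars lf v := by
  rw [flip_freq_loop1, getD_loop1_aux]
  simp

lemma loop1_step_eq :
    (fun (d : PySem.Dict Int String) (kv : String × Int) =>
      if d.contains kv.2 = false then d.insert kv.2 kv.1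
      else d.insert kv.2 (PySem.Str.join "" [d.getD kv.2 "", kv.1]))
    = fun d kv => d.insert kv.2
        (if d.contains kv.2 = false then kv.1 else PySem.Str.join "" [d.getD kv.2 "", kv.1]) := by
  funext d kv
  by_cases h : d.contains kv.2 = false <;> simp [h]

lemma keys_loop1 (lf : List (String × Int)) :
    (flip_freq_loop1 lf).keys = PySem.Set.ofList (lf.map Prod.snd) := by
  rw [flip_freq_loop1, loop1_step_eq,
    PySem.Dict.keys_foldl_insert_key lf Prod.snd
      (fun d kv => if d.contains kv.2 = false then kv.1 else PySem.Str.join "" [d.getD kv.2 "", kv.1]),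
    PySem.Dict.keys_empty, PySem.Set.update_nil_left]

lemma nodup_keys_loop1 (lf : List (String × Int)) : (flip_freq_loop1 lf).keys.Nodup := by
  rw [keys_loop1]; exact PySem.Set.nodup_ofList _

-- a loop of inserts whose value depends only on the (mapped) key
lemma getD_foldl_insert_keyF {α κ ν : Type} [DecidableEq κ] [BEq κ] [LawfulBEq κ]
    (l : List α) (key : α → κ) (F : κ → ν) (d : PySem.Dict κ ν) (v : κ) (d0 : ν) :
    (l.foldl (fun d a => d.insert (key a) (F (key a))) d).getD v d0
      = if v ∈ l.map key then F v else d.getD v d0 := by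
  induction l generalizing d with
  | nil => simp
  | cons h t ih =>
    simp only [List.foldl_cons, ih, List.map_cons, List.mem_cons]
    by_cases hv : v ∈ t.map key
    · simp [hv]
    · by_cases he : v = key h
      · simp [he, PySem.Dict.getD_insert_self]
      · rw [PySem.Dict.getD_insert_of_ne _ _ _ he]
        simp [hv, he]

lemma update_of_subset (s : PySem.Set Int) (l : List Int) (h : ∀ x ∈ l, x ∈ s) :
    s.update l = s := by
  rw [PySem.Set.update_eq_append_filter]
  have : List.filter (fun y => !s.contains y) (PySem.Set.ofList l) = [] := by
    rw [List.filter_eq_nil_iff]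
    intro a ha
    have : a ∈ s := h a ((PySem.Set.mem_ofList _ _).1 ha)
    simp [PySem.Set.contains_eq_listContains]
    exact this
  rw [this, List.append_nil]

-- lexicographic ≤ on (Int × Char): the order of B's composite-key sort
def pvLexLE (a b : Int × Char) : Prop := a.1 < b.1 ∨ (a.1 = b.1 ∧ a.2 ≤ b.2)

lemma pvLexLE_trans : ∀ {a b c : Int × Char}, pvLexLE a b → pvLexLE b c → pvLexLE a c := by
  intro a b c hab hbc
  rcases hab with h | ⟨h1, h2⟩ <;> rcases hbc with g | ⟨g1, g2⟩
  · exact Or.inl (lt_trans h g)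
  · exact Or.inl (by omega)
  · exact Or.inl (by omega)
  · exact Or.inr ⟨by omega, le_trans h2 g2⟩

lemma pairwise_insertBy {α : Type} {R : α → α → Prop} (before : α → α → Bool)
    (h1 : ∀ a b, before a b = true → R a b) (h2 : ∀ a b, before a b = false → R b a)
    (htr : ∀ {a b c : α}, R a b → R b c → R a c)
    (x : α) (ys : List α) (hys : ys.Pairwise R) :
    (PySem.List.insertBy before x ys).Pairwise R := by
  induction ys with
  | nil => simp [PySem.List.insertBy]
  | cons y ys ih =>
    rcases List.pairwise_cons.1 hys with ⟨hy, hys'⟩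
    by_cases hb : before x y = true
    · have he : PySem.List.insertBy before x (y :: ys) = x :: y :: ys := by
        simp [PySem.List.insertBy, hb]
      rw [he]
      refine List.Pairwise.cons ?_ hys
      intro b hbmem
      rcases List.mem_cons.1 hbmem with h | h
      · subst h; exact h1 _ _ hb
      · exact htr (h1 _ _ hb) (hy b h)
    · have he : PySem.List.insertBy before x (y :: ys) = y :: PySem.List.insertBy before x ys := by
        simp [PySem.List.insertBy, hb]
      rw [he]
      refine List.Pairwise.cons ?_ (ih hys')
      intro b hbmem
      rcases (PySem.List.mem_insertBy _ _ _ _).1 hbmem with h | h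
      · subst h; exact h2 _ _ (by simpa using hb)
      · exact hy b h

lemma sorted2_pairs_pairwise (xs : List (Int × Char)) :
    (PySem.List.sorted2 xs Prod.fst Prod.snd false).Pairwise pvLexLE := by
  show (xs.foldl
    (fun acc x => PySem.List.insertBy
      (fun a b => decide (a.1 < b.1) || (!decide (b.1 < a.1) && decide (a.2 < b.2))) x acc)
    []).Pairwise pvLexLE
  have h1 : ∀ a b : Int × Char,
      (decide (a.1 < b.1) || (!decide (b.1 < a.1) && decide (a.2 < b.2))) = true → pvLexLE a b := by
    intro a b h
    simp only [Bool.or_eq_true, Bool.and_eq_true, Bool.not_eq_true', decide_eq_true_eq,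
      decide_eq_false_iff_not] at h
    rcases h with h | ⟨h, h'⟩
    · exact Or.inl h
    · by_cases hf : a.1 < b.1
      · exact Or.inl hf
      · exact Or.inr ⟨by omega, le_of_lt h'⟩
  have h2 : ∀ a b : Int × Char,
      (decide (a.1 < b.1) || (!decide (b.1 < a.1) && decide (a.2 < b.2))) = false → pvLexLE b a := by
    intro a b h
    simp only [Bool.or_eq_false_iff, Bool.and_eq_false_iff, Bool.not_eq_false',
      decide_eq_true_eq, decide_eq_false_iff_not] at h
    rcases h with ⟨hnab, h | h⟩
    · exact Or.inl h
    · by_cases hf : b.1 < a.1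
      · exact Or.inl hf
      · exact Or.inr ⟨by omega, le_of_not_gt h⟩
  have main : ∀ (l : List (Int × Char)) (acc : List (Int × Char)), acc.Pairwise pvLexLE →
      (l.foldl (fun acc x => PySem.List.insertBy
        (fun a b => decide (a.1 < b.1) || (!decide (b.1 < a.1) && decide (a.2 < b.2))) x acc)
        acc).Pairwise pvLexLE := by
    intro l
    induction l with
    | nil => intro acc h; exact h
    | cons x t ih =>
      intro acc h
      exact ih _ (pairwise_insertBy _ h1 h2 (fun hab hbc => pvLexLE_trans hab hbc) x acc h)
  exact main xs [] List.Pairwise.nil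

-- the chars with count v, read off the unsorted pair list
lemma filter_pvPairs (l : List (String × Int)) (v : Int) :
    ((pvPairs l).filter (fun p => p.1 == v)).map Prod.snd = pvChars l v := by
  induction l with
  | nil => rfl
  | cons h t ih =>
    simp only [pvPairs, List.flatMap_cons, List.filter_append, List.map_append] at *
    rw [ih]
    by_cases hv : h.2 = v
    · subst hv
      simp [pvChars, List.filter_map, Function.comp_def]
    · have hb : (h.2 == v) = false := by simp; omega
      simp [pvChars, List.filter_map, Function.comp_def, hb]

-- B's accumulation loop, at key v
lemma getD_modify_fold (pairs : List (Int × Char)) (d : PySem.Dict Int String) (v : Int) :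
    ((pairs.foldl (fun d p => d.modify p.1 "" (fun s => s ++ String.singleton p.2)) d).getD v "").toList
    = (d.getD v "").toList ++ ((pairs.filter (fun p => p.1 == v)).map Prod.snd) := by
  induction pairs generalizing d with
  | nil => simp
  | cons h t ih =>
    simp only [List.foldl_cons, ih, List.filter_cons]
    by_cases he : h.1 = v
    · subst he
      rw [PySem.Dict.getD_modify_self]
      simp
    · rw [PySem.Dict.getD_modify_of_ne _ _ _ (by exact fun hh => he hh.symm)]
      have hb : (h.1 == v) = false := by simp; omega
      simp [hb]

-- ===== VERDICT (by name: the statement is the Claim_ definition above) =====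
theorem flip_freq_spec : Claim_equal_flip_freq := by
  intro lf _dom
  show flip_freq lf = flip_freq_alt lf
  set cf := flip_freq_loop1 lf with hcf
  set SA : String → String :=
    fun s => String.ofList (PySem.List.sorted s.toList (fun c => c) false) with hSA
  set out0 : PySem.Dict Int String :=
    (lf.map Prod.snd).foldl (fun d v => d.insert v "") PySem.Dict.empty with hout0
  set pairs := PySem.List.sorted2 (pvPairs lf) Prod.fst Prod.snd false with hpairs
  set DA := cf.items.foldl (fun d kv => d.insert kv.1 (SA kv.2)) cf with hDA
  set DB := pairs.foldl (fun d p => d.modify p.1 "" (fun s => s ++ String.singleton p.2)) out0 with hDB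
  show DA.items = DB.items
  -- keys of all the dicts involved
  have hkeyscf : cf.keys = PySem.Set.ofList (lf.map Prod.snd) := keys_loop1 lf
  have hndcf : cf.keys.Nodup := nodup_keys_loop1 lf
  have hitems : cf.items.map Prod.fst = cf.keys := rfl
  have hkeysA : DA.keys = cf.keys := by
    rw [hDA, PySem.Dict.keys_foldl_insert_key cf.items Prod.fst (fun d kv => SA kv.2) cf,
      hitems, update_of_subset _ _ (fun x hx => hx)]
  have hndA : DA.keys.Nodup := by rw [hkeysA]; exact hndcf
  have hkeys0 : out0.keys = PySem.Set.ofList (lf.map Prod.snd) := by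
    rw [hout0, PySem.Dict.keys_foldl_insert (lf.map Prod.snd) (fun d v => "") PySem.Dict.empty,
      PySem.Dict.keys_empty, PySem.Set.update_nil_left]
  have hmempairs : ∀ x ∈ pairs.map Prod.fst, x ∈ out0.keys := by
    intro x hx
    rcases List.mem_map.1 hx with ⟨p, hp, hpx⟩
    have hp' : p ∈ pvPairs lf := (PySem.List.sorted2_perm _ _ _ _).mem_iff.1 hp
    rcases List.mem_flatMap.1 hp' with ⟨kv, hkv, hpkv⟩
    rcases List.mem_map.1 hpkv with ⟨c, _, hc⟩
    rw [hkeys0]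
    refine (PySem.Set.mem_ofList _ _).2 ?_
    exact List.mem_map.2 ⟨kv, hkv, by rw [← hpx, ← hc]⟩
  have hkeysB : DB.keys = cf.keys := by
    rw [hDB, PySem.Dict.keys_foldl_modify_key pairs Prod.fst ""
      (fun d p => fun s => s ++ String.singleton p.2) out0,
      update_of_subset _ _ hmempairs, hkeys0, hkeyscf]
  have hndB : DB.keys.Nodup := by rw [hkeysB]; exact hndcf
  -- values at each key of the result
  have hgetA : ∀ v ∈ cf.keys, DA.getD v "" = SA (cf.getD v "") := by
    intro v hv
    have hit : cf.items = cf.keys.map (fun k => (k, cf.getD k "")) :=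
      PySem.Dict.items_eq_map_keys cf hndcf ""
    rw [hDA, hit, List.foldl_map]
    have := getD_foldl_insert_keyF cf.keys (fun k => k) (fun k => SA (cf.getD k "")) cf v ""
    simp only [List.map_id'] at this
    rw [this, if_pos hv]
  have hget0 : ∀ v : Int, out0.getD v "" = "" := by
    intro v
    rw [hout0]
    have := getD_foldl_insert_keyF (lf.map Prod.snd) (fun k => k) (fun _ => "")
      PySem.Dict.empty v ""
    simp only [List.map_id'] at this
    rw [this]
    split <;> simp [PySem.Dict.getD_empty]
  have hgetB : ∀ v : Int, (DB.getD v "").toList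
      = (pairs.filter (fun p => p.1 == v)).map Prod.snd := by
    intro v
    rw [hDB, getD_modify_fold, hget0]
    simp
  -- each group of the composite-key-sorted pair list is that count's sorted letters
  have hgroup : ∀ v : Int, (pairs.filter (fun p => p.1 == v)).map Prod.snd
      = PySem.List.sorted (pvChars lf v) (fun c => c) false := by
    intro v
    refine (PySem.List.sorted_id_eq_of_perm_of_pairwise _ _ ?_ ?_).symm
    · calc ((pairs.filter (fun p => p.1 == v)).map Prod.snd).Perm
            (((pvPairs lf).filter (fun p => p.1 == v)).map Prod.snd) :=
            (((PySem.List.sorted2_perm _ _ _ _).filter _).map _)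
        _ = pvChars lf v := filter_pvPairs lf v
    · have hpw : (pairs.filter (fun p => p.1 == v)).Pairwise pvLexLE :=
        (sorted2_pairs_pairwise (pvPairs lf)).filter _
      rw [List.pairwise_map]
      refine hpw.imp_of_mem ?_
      intro a b ha hb hab
      have hav : a.1 = v := by simpa using (List.mem_filter.1 ha).2
      have hbv : b.1 = v := by simpa using (List.mem_filter.1 hb).2
      rcases hab with h | ⟨_, h⟩
      · omega
      · exact h
  -- assemble: both results are the same key list with the same values
  rw [PySem.Dict.items_eq_map_keys DA hndA "", PySem.Dict.items_eq_map_keys DB hndB "",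
    hkeysA, hkeysB]
  refine List.map_congr_left ?_
  intro k hk
  have h1 : (cf.getD k "").toList = pvChars lf k := getD_loop1 lf k
  have hBval : DB.getD k "" = String.ofList (PySem.List.sorted (pvChars lf k) (fun c => c) false) := by
    have := hgetB k
    rw [hgroup k] at this
    calc DB.getD k "" = String.ofList (DB.getD k "").toList := String.ofList_toList.symm
      _ = _ := by rw [this]
  rw [hgetA k hk, hBval, hSA]
  simp only [h1]
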